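-- pv_equiv track=rewrite | github.com/josephbartlett/code-documenter | documenter.py | remove_sensitive_info
-- ===== SOURCE A (Python) =====
-- def remove_sensitive_info(content):
--     """Mask certain sensitive lines in the file."""
--     lines = content.split('\n')
--     for i, line in enumerate(lines):
--         if "$host =" in line or "$db =" in line or "$user =" in line or "$pass =" in line or "$charset =" in line:
--             parts = line.split('=')
--             if len(parts) > 1:
--                 lines[i] = parts[0] + "= '******';"
--     return '\n'.join(lines)
-- ===== SOURCE B (Python) =====
-- _KEYS = ("$host =", "$db =", "$user =", "$pass =", "$charset =")
--
--
-- def _mask(line):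
--     if any(k in line for k in _KEYS):
--         return line[:line.index('=')] + "= '******';"
--     return line
--
--
-- def remove_sensitive_info(content):
--     """Mask certain sensitive lines: one streaming pass over the characters."""
--     out = []
--     cur = []
--     for ch in content:
--         if ch == '\n':
--             out.append(_mask(''.join(cur)))
--             out.append('\n')
--             cur = []
--         else:
--             cur.append(ch)
--     out.append(_mask(''.join(cur)))
--     return ''.join(out)
-- ===== Notes on version B (the rewrite author's own statement) =====
-- stated objective: alternative
-- what changed: Replaces A's split-into-a-line-list / enumerate / mutate / join pipeline with a single streaming pass over the characters that accumulates the current line and flushes it (masked at its first '=' when a sensitive key is present) at each newline and at the end, never materialising the line list.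
import Mathlib
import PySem

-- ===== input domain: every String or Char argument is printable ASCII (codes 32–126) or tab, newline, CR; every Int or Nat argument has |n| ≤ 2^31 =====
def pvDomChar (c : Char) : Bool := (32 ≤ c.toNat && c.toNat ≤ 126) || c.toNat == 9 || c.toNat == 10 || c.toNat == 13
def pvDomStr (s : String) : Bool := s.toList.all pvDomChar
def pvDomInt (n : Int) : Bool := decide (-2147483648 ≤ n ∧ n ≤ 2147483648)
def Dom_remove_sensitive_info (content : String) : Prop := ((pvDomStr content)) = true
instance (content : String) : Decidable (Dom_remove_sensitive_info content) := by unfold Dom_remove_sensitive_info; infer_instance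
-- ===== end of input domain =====

-- B rewrites A's split/enumerate/join line list as one streaming pass over the characters
-- (masking each line at its first '=' when flushed); alternative decomposition, return value identical.

-- ===== PORT A =====
-- the loop body: lines[i] is replaced exactly as in A
def pvMaskA (line : List Char) : List Char :=
  if PySem.Chars.isIn "$host =".toList line || PySem.Chars.isIn "$db =".toList line ||
     PySem.Chars.isIn "$user =".toList line || PySem.Chars.isIn "$pass =".toList line ||
     PySem.Chars.isIn "$charset =".toList line then
    let parts := PySem.Chars.splitOn line "=".toList
    if parts.length > 1 then parts.headI ++ "= '******';".toList else line
  else line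

def remove_sensitive_info (content : String) : String :=
  let lines := PySem.Chars.splitOn content.toList "\n".toList
  String.mk (PySem.Chars.join "\n".toList (lines.map pvMaskA))

-- ===== PORT B =====
-- Source B's _mask: slice up to the first '=' (line.index('=') exists whenever a key matched)
def pvMaskB (line : List Char) : List Char :=
  if PySem.Chars.isIn "$host =".toList line || PySem.Chars.isIn "$db =".toList line ||
     PySem.Chars.isIn "$user =".toList line || PySem.Chars.isIn "$pass =".toList line ||
     PySem.Chars.isIn "$charset =".toList line then
    PySem.List.slice line none (some (PySem.Chars.find line "=".toList)) ++ "= '******';".toList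
  else line

-- Source B's character loop: cur accumulates the current line, flushed (masked) at '\n' and at the end
def pvGoB : List Char → List Char → List Char
  | cur, [] => pvMaskB cur
  | cur, c :: rest => if c = '\n' then pvMaskB cur ++ '\n' :: pvGoB [] rest else pvGoB (cur ++ [c]) rest

def remove_sensitive_info_alt (content : String) : String :=
  String.mk (pvGoB [] content.toList)

-- ===== PRECONDITION & SPEC =====
def Spec_remove_sensitive_info (content : String) (out : String) : Prop := out = remove_sensitive_info_alt content
instance (content : String) (out : String) : Decidable (Spec_remove_sensitive_info content out) := by unfold Spec_remove_sensitive_info; infer_instance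

-- ===== CLAIM (what is proved, stated in full; the proofs are below) =====
def Claim_equal_remove_sensitive_info : Prop := ∀ (content : String), Dom_remove_sensitive_info content → Spec_remove_sensitive_info content (remove_sensitive_info content)

-- ===== LEMMAS AND PROOFS =====

-- structural single-character split (proof-side model of split('\n') / split('='))
def pvSplit1 (sep : Char) : List Char → List (List Char)
  | [] => [[]]
  | c :: r => if c = sep then [] :: pvSplit1 sep r
              else match pvSplit1 sep r with
                   | [] => [[c]]
                   | h :: t => (c :: h) :: t

def pvMapHead (f : List Char → List Char) : List (List Char) → List (List Char)
  | [] => []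
  | x :: xs => f x :: xs

theorem pvSplit1_ne_nil (sep : Char) (l : List Char) : pvSplit1 sep l ≠ [] := by
  induction l with
  | nil => simp [pvSplit1]
  | cons c r ih =>
    by_cases h : c = sep
    · simp [pvSplit1, h]
    · simp only [pvSplit1, if_neg h]
      cases hs : pvSplit1 sep r <;> simp

theorem pvMapHead_nil_append (ps : List (List Char)) : pvMapHead ([] ++ ·) ps = ps := by
  cases ps <;> simp [pvMapHead]

theorem pvSplit1_cons_ne (sep c : Char) (r : List Char) (h : ¬ c = sep) :
    pvSplit1 sep (c :: r) = pvMapHead (c :: ·) (pvSplit1 sep r) := by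
  simp only [pvSplit1, if_neg h]
  cases hs : pvSplit1 sep r with
  | nil => exact absurd hs (pvSplit1_ne_nil sep r)
  | cons h t => simp [pvMapHead]

theorem pv_splitOn_go (sep : Char) :
    ∀ (l : List Char) (fuel : Nat), l.length < fuel → ∀ (cur : List Char) (acc : List (List Char)),
      PySem.Chars.splitOn.go [sep] fuel l cur acc
        = acc.reverse ++ pvMapHead (cur.reverse ++ ·) (pvSplit1 sep l) := by
  intro l
  induction l with
  | nil =>
    intro fuel hf cur acc
    cases fuel with
    | zero => omega
    | succ n => simp [PySem.Chars.splitOn.go, pvSplit1, pvMapHead]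
  | cons c r ih =>
    intro fuel hf cur acc
    cases fuel with
    | zero => simp at hf
    | succ n =>
      by_cases h : c = sep
      · subst h
        have hpre : List.isPrefixOf [c] (c :: r) = true := by simp [List.isPrefixOf]
        rw [PySem.Chars.splitOn.go]
        simp only [hpre, if_true, List.length_cons, List.drop_succ_cons, List.length_nil, List.drop_zero]
        rw [ih n (by simpa using hf) [] (cur.reverse :: acc)]
        have := pvSplit1_ne_nil c r
        cases hs : pvSplit1 c r with
        | nil => exact absurd hs this
        | cons x xs => simp [pvSplit1, pvMapHead, hs]
      · have hpre : List.isPrefixOf [sep] (c :: r) = false := by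
          simp [List.isPrefixOf]
          exact fun hc => absurd hc.symm h
        rw [PySem.Chars.splitOn.go]
        simp only [hpre, Bool.false_eq_true, if_false]
        rw [ih n (by simpa using hf) (c :: cur) acc]
        rw [pvSplit1_cons_ne sep c r h]
        cases hs : pvSplit1 sep r with
        | nil => exact absurd hs (pvSplit1_ne_nil sep r)
        | cons x xs => simp [pvMapHead]

theorem pv_splitOn_eq (sep : Char) (l : List Char) :
    PySem.Chars.splitOn l [sep] = pvSplit1 sep l := by
  rw [PySem.Chars.splitOn]
  rw [pv_splitOn_go sep l (l.length + 1) (by omega) [] []]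
  cases hs : pvSplit1 sep l with
  | nil => exact absurd hs (pvSplit1_ne_nil sep l)
  | cons x xs => simp [pvMapHead]

theorem pv_take_len_takeWhile (p : Char → Bool) (l : List Char) :
    l.take (l.takeWhile p).length = l.takeWhile p := by
  induction l with
  | nil => rfl
  | cons c r ih =>
    cases h : p c <;> simp [h, ih]

theorem pv_headI_pvSplit1 (sep : Char) (l : List Char) :
    (pvSplit1 sep l).headI = l.takeWhile (fun c => c != sep) := by
  induction l with
  | nil => rfl
  | cons c r ih =>
    by_cases h : c = sep
    · subst h; simp [pvSplit1]
    · rw [pvSplit1_cons_ne sep c r h]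
      cases hs : pvSplit1 sep r with
      | nil => exact absurd hs (pvSplit1_ne_nil sep r)
      | cons x xs =>
        have := ih
        rw [hs] at this
        simp only [pvMapHead, List.headI, List.takeWhile_cons, h, bne_iff_ne, ne_eq, not_false_eq_true, if_pos]
        simpa using this

theorem pv_length_pvSplit1 (sep : Char) (l : List Char) (hm : sep ∈ l) :
    1 < (pvSplit1 sep l).length := by
  induction l with
  | nil => simp at hm
  | cons c r ih =>
    by_cases h : c = sep
    · subst h
      simp only [pvSplit1, if_true]
      have := pvSplit1_ne_nil c r
      cases hs : pvSplit1 c r with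
      | nil => exact absurd hs this
      | cons x xs => simp
    · have hm' : sep ∈ r := by
        cases hm with
        | head => exact absurd rfl h
        | tail _ hmem => exact hmem
      rw [pvSplit1_cons_ne sep c r h]
      cases hs : pvSplit1 sep r with
      | nil => exact absurd hs (pvSplit1_ne_nil sep r)
      | cons x xs =>
        have := ih hm'
        rw [hs] at this
        simpa [pvMapHead] using this

theorem pv_find_go (sep : Char) (l : List Char) :
    ∀ (k : Nat), sep ∈ l →
      PySem.Chars.find.go [sep] l k = ((k : Int) + ((l.takeWhile (fun c => c != sep)).length : Int)) := by
  induction l with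
  | nil => intro k hm; simp at hm
  | cons c r ih =>
    intro k hm
    by_cases h : c = sep
    · subst h
      have hpre : List.isPrefixOf [c] (c :: r) = true := by simp [List.isPrefixOf]
      rw [PySem.Chars.find.go]
      simp [hpre]
    · have hpre : List.isPrefixOf [sep] (c :: r) = false := by
        simp [List.isPrefixOf]
        exact fun hc => absurd hc.symm h
      have hm' : sep ∈ r := by
        cases hm with
        | head => exact absurd rfl h
        | tail _ hmem => exact hmem
      rw [PySem.Chars.find.go]
      simp only [hpre, Bool.false_eq_true, if_false]
      rw [ih (k + 1) hm']
      simp [h]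
      omega

theorem pv_find_eq (sep : Char) (l : List Char) (hm : sep ∈ l) :
    PySem.Chars.find l [sep] = ((l.takeWhile (fun c => c != sep)).length : Int) := by
  rw [PySem.Chars.find, pv_find_go sep l 0 hm]
  omega

theorem pv_mem_of_isIn (sub l : List Char) (c : Char) (hc : c ∈ sub)
    (h : PySem.Chars.isIn sub l = true) : c ∈ l := by
  have := (PySem.Chars.isIn_iff_infix sub l).mp h
  exact this.subset hc

theorem pv_mask_eq (line : List Char) : pvMaskA line = pvMaskB line := by
  unfold pvMaskA pvMaskB
  by_cases h : (PySem.Chars.isIn "$host =".toList line || PySem.Chars.isIn "$db =".toList line ||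
     PySem.Chars.isIn "$user =".toList line || PySem.Chars.isIn "$pass =".toList line ||
     PySem.Chars.isIn "$charset =".toList line) = true
  · rw [if_pos h, if_pos h]
    have hm : '=' ∈ line := by
      rcases Bool.or_eq_true _ _ |>.mp h with h4 | h5
      · rcases Bool.or_eq_true _ _ |>.mp h4 with h3 | hu
        · rcases Bool.or_eq_true _ _ |>.mp h3 with h2 | hu
          · rcases Bool.or_eq_true _ _ |>.mp h2 with h1 | hu
            · exact pv_mem_of_isIn _ _ '=' (by decide) h1
            · exact pv_mem_of_isIn _ _ '=' (by decide) hu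
          · exact pv_mem_of_isIn _ _ '=' (by decide) hu
        · exact pv_mem_of_isIn _ _ '=' (by decide) hu
      · exact pv_mem_of_isIn _ _ '=' (by decide) h5
    have heq : ("=".toList : List Char) = ['='] := rfl
    rw [heq, pv_splitOn_eq '=' line, pv_find_eq '=' line hm]
    rw [if_pos (by simpa using pv_length_pvSplit1 '=' line hm)]
    rw [PySem.List.slice_to line (by positivity)]
    rw [pv_headI_pvSplit1 '=' line]
    rw [Int.toNat_natCast, pv_take_len_takeWhile]
  · rw [if_neg h, if_neg h]

theorem pv_goB_eq (s : List Char) :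
    ∀ (cur : List Char),
      pvGoB cur s
        = PySem.Chars.join ['\n'] ((pvMapHead (cur ++ ·) (pvSplit1 '\n' s)).map pvMaskB) := by
  induction s with
  | nil => intro cur; simp [pvGoB, pvSplit1, pvMapHead, PySem.Chars.join_singleton]
  | cons c r ih =>
    intro cur
    by_cases h : c = '\n'
    · subst h
      show pvMaskB cur ++ '\n' :: pvGoB [] r = _
      rw [ih []]
      cases hs : pvSplit1 '\n' r with
      | nil => exact absurd hs (pvSplit1_ne_nil '\n' r)
      | cons x xs =>
        simp only [pvSplit1, if_true, hs, pvMapHead, List.map_cons, List.append_nil,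
          List.nil_append, PySem.Chars.join_cons_cons]
        simp
    · rw [show pvGoB cur (c :: r) = pvGoB (cur ++ [c]) r by simp [pvGoB, h]]
      rw [ih (cur ++ [c])]
      rw [pvSplit1_cons_ne '\n' c r h]
      cases hs : pvSplit1 '\n' r with
      | nil => exact absurd hs (pvSplit1_ne_nil '\n' r)
      | cons x xs => simp [pvMapHead]

-- ===== VERDICT (by name: the statement is the Claim_ definition above) =====
theorem remove_sensitive_info_spec : Claim_equal_remove_sensitive_info := by
  intro content _
  unfold Spec_remove_sensitive_info remove_sensitive_info remove_sensitive_info_alt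
  have heq : ("\n".toList : List Char) = ['\n'] := rfl
  rw [heq, pv_splitOn_eq '\n' content.toList, pv_goB_eq content.toList []]
  rw [pvMapHead_nil_append]
  have hmap : List.map pvMaskA (pvSplit1 '\n' content.toList)
      = List.map pvMaskB (pvSplit1 '\n' content.toList) :=
    List.map_congr_left (fun line _ => pv_mask_eq line)
  exact congrArg String.mk (congrArg (PySem.Chars.join ['\n']) hmap)
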